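-- pv_equiv track=rewrite | github.com/Developer-Taher/Mastering-Python | 6_strings.py | simple_spell_check
-- ===== SOURCE A (Python) =====
-- def levenshtein_distance(str1, str2):
--     """Calculate Levenshtein distance between two strings"""
--     if len(str1) < len(str2):
--         return levenshtein_distance(str2, str1)
--
--     if len(str2) == 0:
--         return len(str1)
--
--     previous_row = list(range(len(str2) + 1))
--     for i, c1 in enumerate(str1):
--         current_row = [i + 1]
--         for j, c2 in enumerate(str2):
--             insertions = previous_row[j + 1] + 1
--             deletions = current_row[j] + 1
--             substitutions = previous_row[j] + (c1 != c2)
--             current_row.append(min(insertions, deletions, substitutions))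
--         previous_row = current_row
--
--     return previous_row[-1]
--
-- def simple_spell_check(word, dictionary):
--     """Simple spell checker with suggestions"""
--     if word.lower() in [d.lower() for d in dictionary]:
--         return True, []
--
--     # Find similar words (simple approach)
--     suggestions = []
--     for dict_word in dictionary:
--         if abs(len(word) - len(dict_word)) <= 2:
--             distance = levenshtein_distance(word.lower(), dict_word.lower())
--             if distance <= 2:
--                 suggestions.append((dict_word, distance))
--
--     # Sort by distance and return top 3
--     suggestions.sort(key=lambda x: x[1])
--     return False, [word for word, _ in suggestions[:3]]
-- ===== SOURCE B (Python) =====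
-- def _edit_distance(s, t):
--     """Levenshtein distance via top-down memoized recursion on index pairs."""
--     memo = {}
--     def e(i, j):
--         if i == 0:
--             return j
--         if j == 0:
--             return i
--         key = (i, j)
--         if key not in memo:
--             memo[key] = min(e(i - 1, j) + 1,
--                             e(i, j - 1) + 1,
--                             e(i - 1, j - 1) + (s[i - 1] != t[j - 1]))
--         return memo[key]
--     return e(len(s), len(t))
--
-- def simple_spell_check(word, dictionary):
--     """Simple spell checker with suggestions"""
--     w = word.lower()
--     if any(d.lower() == w for d in dictionary):
--         return True, []
--     # Bucket candidates by their distance (0, 1 or 2); concatenating the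
--     # buckets in order reproduces a stable sort by distance.
--     buckets = ([], [], [])
--     for dict_word in dictionary:
--         if abs(len(word) - len(dict_word)) <= 2:
--             d = _edit_distance(w, dict_word.lower())
--             if d <= 2:
--                 buckets[d].append(dict_word)
--     return False, (buckets[0] + buckets[1] + buckets[2])[:3]
-- ===== Notes on version B (the rewrite author's own statement) =====
-- stated objective: alternative
-- what changed: The bottom-up rolling-row Levenshtein DP (with the swap-to-longer wrapper) is replaced by a top-down memoized recursion on index pairs, and the stable sort by distance plus top-3 slice is replaced by three distance buckets (0/1/2) concatenated in order.
import Mathlib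
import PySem

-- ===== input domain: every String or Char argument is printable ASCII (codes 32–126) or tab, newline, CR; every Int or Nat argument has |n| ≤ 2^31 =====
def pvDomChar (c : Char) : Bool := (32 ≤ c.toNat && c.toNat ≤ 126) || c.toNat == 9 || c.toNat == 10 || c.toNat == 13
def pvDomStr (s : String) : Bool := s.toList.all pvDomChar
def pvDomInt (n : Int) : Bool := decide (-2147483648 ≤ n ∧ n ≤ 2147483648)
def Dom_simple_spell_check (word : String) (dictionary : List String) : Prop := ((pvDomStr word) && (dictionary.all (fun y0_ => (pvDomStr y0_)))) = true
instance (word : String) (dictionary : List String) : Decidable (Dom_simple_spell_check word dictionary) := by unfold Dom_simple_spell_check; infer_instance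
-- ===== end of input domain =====

-- B replaces A's bottom-up rolling-row Levenshtein DP by a top-down memoized recursion on
-- index pairs, and replaces the stable sort by distance-buckets; objective: alternative.

-- ===== PORT A =====
-- inner 'for j, c2 in enumerate(str2)' loop of levenshtein_distance: builds current_row
def levRow (c1 : Char) (s2 : List Char) (prev : List Nat) (i : Nat) : List Nat :=
  (s2.zipIdx).foldl
    (fun cur p =>
      let insertions := prev.getD (p.2 + 1) 0 + 1
      let deletions := cur.getD p.2 0 + 1
      let substitutions := prev.getD p.2 0 + (if c1 ≠ p.1 then 1 else 0)
      cur ++ [min insertions (min deletions substitutions)])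
    [i + 1]

def levChars (s1 s2 : List Char) : Nat :=
  if _h : s1.length < s2.length then levChars s2 s1
  else if s2.length = 0 then s1.length
  else
    PySem.List.pyGetD
      ((s1.zipIdx).foldl (fun prev p => levRow p.1 s2 prev p.2) (List.range (s2.length + 1)))
      (-1) 0
termination_by s2.length

def levenshtein_distance (str1 str2 : String) : Nat :=
  levChars str1.toList str2.toList

def simple_spell_check (word : String) (dictionary : List String) : Bool × List String :=
  if (dictionary.map (fun d => PySem.Str.lower d)).contains (PySem.Str.lower word) then
    (true, [])
  else
    let suggestions : List (String × Nat) :=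
      dictionary.foldl
        (fun acc dict_word =>
          if (PySem.Str.len word - PySem.Str.len dict_word).natAbs ≤ 2 then
            let distance := levenshtein_distance (PySem.Str.lower word) (PySem.Str.lower dict_word)
            if distance ≤ 2 then acc ++ [(dict_word, distance)] else acc
          else acc)
        []
    (false, ((PySem.List.sorted suggestions (fun x => x.2)).take 3).map (fun x => x.1))

-- ===== PORT B =====
-- memoized e(i, j) of Source B (memoization is an evaluation detail; the values are identical)
def editDist (s t : List Char) : Nat → Nat → Nat
  | 0, j => j
  | i + 1, 0 => i + 1
  | i + 1, j + 1 =>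
    min (editDist s t i (j + 1) + 1)
      (min (editDist s t (i + 1) j + 1)
        (editDist s t i j + (if s.getD i ' ' ≠ t.getD j ' ' then 1 else 0)))
termination_by i j => i + j

def editFull (s t : List Char) : Nat := editDist s t s.length t.length

def simple_spell_check_alt (word : String) (dictionary : List String) : Bool × List String :=
  let w := PySem.Str.lower word
  if dictionary.any (fun d => PySem.Str.lower d == w) then
    (true, [])
  else
    -- 'buckets[d].append(dict_word)' under 'd <= 2', written as a chain on d = 0, 1, 2
    let buckets :=
      dictionary.foldl
        (fun (b : List String × List String × List String) dict_word =>
          if (PySem.Str.len word - PySem.Str.len dict_word).natAbs ≤ 2 then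
            let d := editFull w.toList (PySem.Str.lower dict_word).toList
            if d = 0 then (b.1 ++ [dict_word], b.2.1, b.2.2)
            else if d = 1 then (b.1, b.2.1 ++ [dict_word], b.2.2)
            else if d = 2 then (b.1, b.2.1, b.2.2 ++ [dict_word])
            else b
          else b)
        ([], [], [])
    (false, (buckets.1 ++ buckets.2.1 ++ buckets.2.2).take 3)

-- ===== PRECONDITION & SPEC =====
def Spec_simple_spell_check (word : String) (dictionary : List String) (out : Bool × List String) : Prop := out = simple_spell_check_alt word dictionary
instance (word : String) (dictionary : List String) (out : Bool × List String) : Decidable (Spec_simple_spell_check word dictionary out) := by unfold Spec_simple_spell_check; infer_instance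

-- ===== CLAIM (what is proved, stated in full; the proofs are below) =====
def Claim_equal_simple_spell_check : Prop := ∀ (word : String) (dictionary : List String), Dom_simple_spell_check word dictionary → Spec_simple_spell_check word dictionary (simple_spell_check word dictionary)

-- ===== LEMMAS AND PROOFS =====

lemma editDist_zero_right (s t : List Char) (i : Nat) : editDist s t i 0 = i := by
  cases i <;> simp [editDist]

lemma editDist_zero_left (s t : List Char) (j : Nat) : editDist s t 0 j = j := by
  simp [editDist]

lemma editDist_succ_succ (s t : List Char) (i j : Nat) :
    editDist s t (i + 1) (j + 1) =
      min (editDist s t i (j + 1) + 1)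
        (min (editDist s t (i + 1) j + 1)
          (editDist s t i j + (if s.getD i ' ' ≠ t.getD j ' ' then 1 else 0))) := by
  rw [editDist]

lemma editDist_symm_aux (s t : List Char) :
    ∀ n i j, i + j ≤ n → editDist s t i j = editDist t s j i := by
  intro n
  induction n with
  | zero =>
    intro i j h
    have hi : i = 0 := by omega
    have hj : j = 0 := by omega
    subst hi; subst hj
    rw [editDist_zero_left, editDist_zero_right]
  | succ n ih =>
    intro i j h
    match i, j with
    | 0, j => rw [editDist_zero_left, editDist_zero_right]
    | i + 1, 0 => rw [editDist_zero_left, editDist_zero_right]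
    | i + 1, j + 1 =>
      show editDist s t (i+1) (j+1) = editDist t s (j+1) (i+1)
      rw [editDist_succ_succ, editDist_succ_succ]
      rw [ih i (j+1) (by omega), ih (i+1) j (by omega), ih i j (by omega)]
      have hc : (if s.getD i ' ' ≠ t.getD j ' ' then 1 else 0) =
          (if t.getD j ' ' ≠ s.getD i ' ' then 1 else 0) := by
        by_cases hcc : s.getD i ' ' = t.getD j ' ' <;> simp [eq_comm]
      rw [hc]; omega

lemma editDist_symm (s t : List Char) (i j : Nat) : editDist s t i j = editDist t s j i :=
  editDist_symm_aux s t (i + j) i j le_rfl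

lemma levRow_aux (c1 : Char) (t s : List Char) (prev : List Nat) (i : Nat)
    (hprev : prev = (List.range (t.length + 1)).map (fun j => editDist s t i j))
    (hc1 : c1 = s.getD i ' ') :
    ∀ (u : List Char) (j0 : Nat), t.drop j0 = u → j0 ≤ t.length →
    ∀ cur : List Nat, cur = (List.range (j0 + 1)).map (fun j => editDist s t (i + 1) j) →
    (u.zipIdx j0).foldl
      (fun cur p =>
        cur ++ [min (prev.getD (p.2 + 1) 0 + 1)
          (min (cur.getD p.2 0 + 1) (prev.getD p.2 0 + (if c1 ≠ p.1 then 1 else 0)))]) cur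
      = (List.range (t.length + 1)).map (fun j => editDist s t (i + 1) j) := by
  intro u
  induction u with
  | nil =>
    intro j0 hdrop hle cur hcur
    have hj : j0 = t.length := by
      have := List.drop_eq_nil_iff.mp hdrop
      omega
    subst hj
    simpa using hcur
  | cons c2 u' ih =>
    intro j0 hdrop hle cur hcur
    have hlt : j0 < t.length := by
      by_contra hge
      rw [List.drop_eq_nil_iff.mpr (by omega)] at hdrop
      simp at hdrop
    have hdec : t.drop j0 = t[j0] :: t.drop (j0 + 1) := List.drop_eq_getElem_cons hlt
    rw [hdrop] at hdec
    rw [List.cons.injEq] at hdec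
    obtain ⟨hc2, hu'⟩ := hdec
    replace hu' : t.drop (j0 + 1) = u' := hu'.symm
    rw [List.zipIdx_cons, List.foldl_cons]
    apply ih (j0 + 1) hu' (by omega)
    have e1 : prev.getD (j0 + 1) 0 = editDist s t i (j0 + 1) := by
      rw [hprev]; exact PySem.List.getD_map_range _ _ _ _ (by omega)
    have e2 : cur.getD j0 0 = editDist s t (i + 1) j0 := by
      rw [hcur]; exact PySem.List.getD_map_range _ _ _ _ (by omega)
    have e3 : prev.getD j0 0 = editDist s t i j0 := by
      rw [hprev]; exact PySem.List.getD_map_range _ _ _ _ (by omega)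
    rw [e1, e2, e3, hcur]
    have hcost : (if c1 ≠ (c2, j0).1 then 1 else 0) =
        (if s.getD i ' ' ≠ t.getD j0 ' ' then 1 else 0) := by
      rw [hc1, hc2]
      rw [List.getD_eq_getElem t ' ' hlt]
    rw [hcost, ← editDist_succ_succ]
    rw [List.range_succ (n := j0 + 1), List.map_append, List.map_cons, List.map_nil]

lemma levRow_spec (s t : List Char) (i : Nat) :
    levRow (s.getD i ' ') t ((List.range (t.length + 1)).map (fun j => editDist s t i j)) i
      = (List.range (t.length + 1)).map (fun j => editDist s t (i + 1) j) := by
  have h := levRow_aux (s.getD i ' ') t s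
    ((List.range (t.length + 1)).map (fun j => editDist s t i j)) i rfl rfl
    t 0 (by simp) (by omega)
    ([i + 1]) (by simp [editDist_zero_right])
  simpa [levRow] using h

lemma levOuter (s t : List Char) :
    ∀ (u : List Char) (i0 : Nat), s.drop i0 = u → i0 ≤ s.length →
    ∀ prev, prev = (List.range (t.length + 1)).map (fun j => editDist s t i0 j) →
    (u.zipIdx i0).foldl (fun prev p => levRow p.1 t prev p.2) prev
      = (List.range (t.length + 1)).map (fun j => editDist s t s.length j) := by
  intro u
  induction u with
  | nil =>
    intro i0 hdrop hle prev hprev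
    have hi : i0 = s.length := by
      have := List.drop_eq_nil_iff.mp hdrop
      omega
    subst hi
    simpa using hprev
  | cons c1 u' ih =>
    intro i0 hdrop hle prev hprev
    have hlt : i0 < s.length := by
      by_contra hge
      rw [List.drop_eq_nil_iff.mpr (by omega)] at hdrop
      simp at hdrop
    have hdec : s.drop i0 = s[i0] :: s.drop (i0 + 1) := List.drop_eq_getElem_cons hlt
    rw [hdrop] at hdec
    rw [List.cons.injEq] at hdec
    obtain ⟨hc1, hu'⟩ := hdec
    replace hu' : s.drop (i0 + 1) = u' := hu'.symm
    rw [List.zipIdx_cons, List.foldl_cons]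
    apply ih (i0 + 1) hu' (by omega)
    rw [hprev, hc1, show s[i0] = s.getD i0 ' ' from (List.getD_eq_getElem s ' ' hlt).symm]
    exact levRow_spec s t i0

lemma levChars_eq_of_ge (s1 s2 : List Char) (h : ¬ s1.length < s2.length) :
    levChars s1 s2 = editDist s1 s2 s1.length s2.length := by
  rw [levChars]
  rw [dif_neg h]
  by_cases h0 : s2.length = 0
  · rw [if_pos h0, h0, editDist_zero_right]
  · rw [if_neg h0]
    rw [levOuter s1 s2 s1 0 (by simp) (by omega) _
      (by simp [editDist_zero_left])]
    rw [List.range_succ, List.map_append]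
    simp only [List.map_cons, List.map_nil]
    rw [PySem.List.pyGetD_neg_one_append_singleton]

lemma levChars_eq (s1 s2 : List Char) :
    levChars s1 s2 = editDist s1 s2 s1.length s2.length := by
  by_cases h : s1.length < s2.length
  · rw [levChars, dif_pos h, levChars_eq_of_ge s2 s1 (by omega)]
    exact (editDist_symm s1 s2 s1.length s2.length).symm
  · exact levChars_eq_of_ge s1 s2 h

lemma lev_eq_editFull (a b : String) :
    levenshtein_distance a b = editFull a.toList b.toList := by
  rw [levenshtein_distance, editFull, levChars_eq]

lemma insertBy_append_not_before {α : Type} (b : α → α → Bool) (x : α) (l1 l2 : List α)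
    (h : ∀ y ∈ l1, b x y = false) :
    PySem.List.insertBy b x (l1 ++ l2) = l1 ++ PySem.List.insertBy b x l2 := by
  induction l1 with
  | nil => simp
  | cons y l1 ih =>
    rw [List.cons_append, show PySem.List.insertBy b x (y :: (l1 ++ l2)) =
      if b x y = true then x :: y :: (l1 ++ l2) else y :: PySem.List.insertBy b x (l1 ++ l2)
      from rfl]
    rw [if_neg (by simp [h y (by simp)]), ih (fun y hy => h y (by simp [hy]))]
    simp

lemma insertBy_all_before {α : Type} (b : α → α → Bool) (x : α) (l : List α)
    (h : ∀ y ∈ l, b x y = true) :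
    PySem.List.insertBy b x l = x :: l := by
  cases l with
  | nil => rfl
  | cons y ys =>
    rw [show PySem.List.insertBy b x (y :: ys) =
      if b x y = true then x :: y :: ys else y :: PySem.List.insertBy b x ys from rfl]
    rw [if_pos (h y (by simp))]

lemma sorted_aux (S : List (String × Nat)) (h : ∀ q ∈ S, q.2 ≤ 2) :
    ∀ c0 c1 c2 : List (String × Nat),
    (∀ y ∈ c0, y.2 = 0) → (∀ y ∈ c1, y.2 = 1) → (∀ y ∈ c2, y.2 = 2) →
    S.foldl (fun acc x => PySem.List.insertBy (fun a b => decide (a.2 < b.2)) x acc)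
        (c0 ++ c1 ++ c2)
      = (c0 ++ S.filter (fun q => q.2 == 0)) ++ (c1 ++ S.filter (fun q => q.2 == 1)) ++
          (c2 ++ S.filter (fun q => q.2 == 2)) := by
  induction S with
  | nil => intro c0 c1 c2 _ _ _; simp
  | cons x S ih =>
    intro c0 c1 c2 h0 h1 h2
    have hx : x.2 ≤ 2 := h x (by simp)
    have hS : ∀ q ∈ S, q.2 ≤ 2 := fun q hq => h q (by simp [hq])
    rw [List.foldl_cons]
    match hxk : x.2, hx with
    | 0, _ =>
      rw [List.append_assoc c0 c1 c2,
        insertBy_append_not_before _ _ c0 _ (by intro y hy; simp [h0 y hy, hxk]),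
        insertBy_all_before _ _ (c1 ++ c2) (by
          intro y hy
          rcases List.mem_append.mp hy with hy1 | hy2
          · simp [h1 y hy1, hxk]
          · simp [h2 y hy2, hxk])]
      have := ih hS (c0 ++ [x]) c1 c2
        (by intro y hy; rcases List.mem_append.mp hy with hy1 | hy2
            · exact h0 y hy1
            · simp at hy2; subst hy2; exact hxk)
        h1 h2
      rw [show c0 ++ (x :: (c1 ++ c2)) = (c0 ++ [x]) ++ c1 ++ c2 by simp] at *
      rw [this]
      simp [hxk]
    | 1, _ =>
      rw [insertBy_append_not_before _ _ (c0 ++ c1) _ (by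
          intro y hy
          rcases List.mem_append.mp hy with hy1 | hy2
          · simp [h0 y hy1, hxk]
          · simp [h1 y hy2, hxk]),
        insertBy_all_before _ _ c2 (by intro y hy; simp [h2 y hy, hxk])]
      have := ih hS c0 (c1 ++ [x]) c2 h0
        (by intro y hy; rcases List.mem_append.mp hy with hy1 | hy2
            · exact h1 y hy1
            · simp at hy2; subst hy2; exact hxk)
        h2
      rw [show (c0 ++ c1) ++ (x :: c2) = c0 ++ (c1 ++ [x]) ++ c2 by simp] at *
      rw [this]
      simp [hxk]
    | 2, _ =>
      rw [PySem.List.insertBy_of_forall_not_before _ _ _ (by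
          intro y hy
          rcases List.mem_append.mp hy with hy1 | hy2
          · rcases List.mem_append.mp hy1 with hy3 | hy4
            · simp [h0 y hy3, hxk]
            · simp [h1 y hy4, hxk]
          · simp [h2 y hy2, hxk])]
      have := ih hS c0 c1 (c2 ++ [x]) h0 h1
        (by intro y hy; rcases List.mem_append.mp hy with hy1 | hy2
            · exact h2 y hy1
            · simp at hy2; subst hy2; exact hxk)
      rw [show (c0 ++ c1 ++ c2) ++ [x] = c0 ++ c1 ++ (c2 ++ [x]) by simp] at *
      rw [this]
      simp [hxk]

lemma sorted_three_buckets (S : List (String × Nat)) (h : ∀ q ∈ S, q.2 ≤ 2) :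
    PySem.List.sorted S (fun q => q.2) =
      S.filter (fun q => q.2 == 0) ++ S.filter (fun q => q.2 == 1) ++ S.filter (fun q => q.2 == 2) := by
  rw [PySem.List.sorted_eq_foldl_insertBy]
  have := sorted_aux S h [] [] [] (by simp) (by simp) (by simp)
  simpa using this

lemma tri_foldl (q : String → Prop) [DecidablePred q] (g : String → Nat) :
    ∀ (l : List String) (b0 b1 b2 : List String),
    l.foldl (fun (b : List String × List String × List String) x =>
        if q x then
          (if g x = 0 then (b.1 ++ [x], b.2.1, b.2.2)
           else if g x = 1 then (b.1, b.2.1 ++ [x], b.2.2)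
           else if g x = 2 then (b.1, b.2.1, b.2.2 ++ [x]) else b)
        else b) (b0, b1, b2)
    = (b0 ++ l.filter (fun x => decide (q x) && (g x == 0)),
       b1 ++ l.filter (fun x => decide (q x) && (g x == 1)),
       b2 ++ l.filter (fun x => decide (q x) && (g x == 2))) := by
  intro l
  induction l with
  | nil => intro b0 b1 b2; simp
  | cons x l ih =>
    intro b0 b1 b2
    rw [List.foldl_cons]
    by_cases hp : q x
    · by_cases h0 : g x = 0
      · rw [if_pos hp, if_pos h0, ih]
        simp [hp, h0]
      · by_cases h1 : g x = 1
        · rw [if_pos hp, if_neg h0, if_pos h1, ih]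
          simp [hp, h1]
        · by_cases h2 : g x = 2
          · rw [if_pos hp, if_neg h0, if_neg h1, if_pos h2, ih]
            simp [hp, h2]
          · rw [if_pos hp, if_neg h0, if_neg h1, if_neg h2, ih]
            simp [hp, h0, h1, h2]
    · rw [if_neg hp, ih]
      simp [hp]

lemma sugg_foldl (q : String → Prop) [DecidablePred q] (g : String → Nat) :
    ∀ (l : List String) (acc : List (String × Nat)),
    l.foldl (fun acc x =>
        if q x then (if g x ≤ 2 then acc ++ [(x, g x)] else acc) else acc) acc
      = acc ++ (l.filter (fun x => decide (q x) && decide (g x ≤ 2))).map (fun x => (x, g x)) := by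
  intro l
  induction l with
  | nil => intro acc; simp
  | cons x l ih =>
    intro acc
    rw [List.foldl_cons]
    by_cases hp : q x
    · by_cases h2 : g x ≤ 2
      · rw [if_pos hp, if_pos h2, ih]
        simp [hp, h2]
      · rw [if_pos hp, if_neg h2, ih]
        simp [hp, h2]
    · rw [if_neg hp, ih]
      simp [hp]

lemma bucket_fst (dict : List String) (p : String → Bool) (g : String → Nat) (k : Nat)
    (hk : k ≤ 2) :
    (((dict.filter (fun x => p x && decide (g x ≤ 2))).map (fun x => (x, g x))).filter
        (fun q => q.2 == k)).map (fun q => q.1)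
      = dict.filter (fun x => p x && (g x == k)) := by
  induction dict with
  | nil => simp
  | cons x dict ih =>
    by_cases hp : p x
    · by_cases hgk : g x = k
      · simp [hp, hgk, Nat.le_trans (le_of_eq rfl) hk, ih]
      · by_cases hg2 : g x ≤ 2
        · simp [hp, hgk, hg2, ih]
        · simp [hp, hgk, hg2, ih]
    · simp [hp, ih]

-- ===== VERDICT (by name: the statement is the Claim_ definition above) =====
theorem simple_spell_check_spec : Claim_equal_simple_spell_check := by
  intro word dictionary _
  unfold Spec_simple_spell_check simple_spell_check simple_spell_check_alt
  have hmem : ((dictionary.map (fun d => PySem.Str.lower d)).contains (PySem.Str.lower word))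
      = dictionary.any (fun d => PySem.Str.lower d == PySem.Str.lower word) := by
    simp [List.any_eq]
  rw [hmem]
  by_cases hin : dictionary.any (fun d => PySem.Str.lower d == PySem.Str.lower word) = true
  · simp only [hin, if_true]
  · simp only [hin, Bool.not_eq_true] at *
    simp only [Bool.false_eq_true, if_false]
    simp only [lev_eq_editFull]
    rw [sugg_foldl (fun d => (PySem.Str.len word - PySem.Str.len d).natAbs ≤ 2)
        (fun d => editFull (PySem.Str.lower word).toList (PySem.Str.lower d).toList) dictionary []]
    rw [tri_foldl (fun d => (PySem.Str.len word - PySem.Str.len d).natAbs ≤ 2)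
        (fun d => editFull (PySem.Str.lower word).toList (PySem.Str.lower d).toList) dictionary [] [] []]
    simp only [List.nil_append]
    rw [sorted_three_buckets _ (by
      intro qq hq
      simp only [List.mem_map] at hq
      obtain ⟨x, hx, rfl⟩ := hq
      simp only [List.mem_filter, Bool.and_eq_true, decide_eq_true_eq] at hx
      exact hx.2.2)]
    rw [List.map_take]
    congr 2
    rw [List.map_append, List.map_append]
    rw [bucket_fst dictionary _ _ 0 (by omega), bucket_fst dictionary _ _ 1 (by omega),
      bucket_fst dictionary _ _ 2 (by omega)]
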